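-- pv_equiv track=rewrite | github.com/maksiplus19/serpent | source/serpent.py | linear_transform_table
-- ===== SOURCE A (Python) =====
-- from typing import List, Union
--
-- def linear_transform_table(b: int, table: List[List[int]]) -> int:
--     """Doesn't work"""
--     res = 0
--     for bits_num in table[::-1]:
--         bit = 0
--         for num in bits_num:
--             bit ^= (b >> num) & 1
--         res <<= 1
--         res |= bit
--     return res
-- ===== SOURCE B (Python) =====
-- def linear_transform_table(b, table):
--     if not table:
--         return 0
--     bit = sum((b >> num) & 1 for num in table[0]) % 2
--     return bit + 2 * linear_transform_table(b, table[1:])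
-- ===== Notes on version B (the rewrite author's own statement) =====
-- stated objective: alternative
-- what changed: Replaces A's iterative reverse-then-shift-accumulate bit packing (table[::-1], res<<=1, res|=bit, inner XOR fold) by structural recursion on the table (head bit + 2*recurse on tail) with each row's bit computed arithmetically as sum of extracted bits mod 2 instead of an XOR fold; no reversal and no shift/or operations.
import Mathlib
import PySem

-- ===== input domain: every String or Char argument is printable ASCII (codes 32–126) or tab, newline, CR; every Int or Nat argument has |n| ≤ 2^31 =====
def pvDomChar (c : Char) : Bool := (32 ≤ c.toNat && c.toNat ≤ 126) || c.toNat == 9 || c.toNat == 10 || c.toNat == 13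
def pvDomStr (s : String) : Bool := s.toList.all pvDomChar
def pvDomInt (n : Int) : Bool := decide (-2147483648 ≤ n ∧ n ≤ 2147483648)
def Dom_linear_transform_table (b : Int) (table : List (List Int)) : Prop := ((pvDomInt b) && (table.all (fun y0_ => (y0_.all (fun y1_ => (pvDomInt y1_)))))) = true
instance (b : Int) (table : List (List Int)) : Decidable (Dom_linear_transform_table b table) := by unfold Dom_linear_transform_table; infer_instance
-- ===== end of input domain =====

-- B replaces A's iterative reverse-then-shift-accumulate packing by structural recursion
-- (head bit + 2 * recurse on tail), computing each row bit as a sum of bits mod 2.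


-- ===== PORT A =====
-- inner loop 'bit ^= (b >> num) & 1'; exact for num ≥ 0
-- (Pre_ excludes negative shift counts, where Python raises ValueError)
def pvParity (b : Int) (row : List Int) : Int :=
  row.foldl (fun bit num => PySem.Int.bxor bit (PySem.Int.band (b >>> num.toNat) 1)) 0

-- table[::-1] is List.reverse; 'res <<= 1; res |= bit' fused
def linear_transform_table (b : Int) (table : List (List Int)) : Int :=
  table.reverse.foldl (fun res row => PySem.Int.bor (res <<< (1 : Nat)) (pvParity b row)) 0

-- ===== PORT B =====
-- 'sum((b >> num) & 1 for num in table[0]) % 2'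
def pvRowBit (b : Int) (row : List Int) : Int :=
  PySem.Int.mod ((row.map (fun num => PySem.Int.band (b >>> num.toNat) 1)).sum) 2

-- recursion: bit + 2 * linear_transform_table(b, table[1:])
def linear_transform_table_alt (b : Int) (table : List (List Int)) : Int :=
  match table with
  | [] => 0
  | first :: rest => pvRowBit b first + 2 * linear_transform_table_alt b rest

-- ===== PRECONDITION & SPEC =====
-- Python raises ValueError on 'b >> num' for negative num: exclude negative shift counts.
def Pre_linear_transform_table (b : Int) (table : List (List Int)) : Prop :=
  ∀ row ∈ table, ∀ num ∈ row, 0 ≤ num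
instance (b : Int) (table : List (List Int)) : Decidable (Pre_linear_transform_table b table) := by
  unfold Pre_linear_transform_table; infer_instance

def pvWitness_linear_transform_table : Int × List (List Int) := (5, [[0, 1], [2]])

def Spec_linear_transform_table (b : Int) (table : List (List Int)) (out : Int) : Prop := out = linear_transform_table_alt b table
instance (b : Int) (table : List (List Int)) (out : Int) : Decidable (Spec_linear_transform_table b table out) := by unfold Spec_linear_transform_table; infer_instance

-- ===== CLAIM (what is proved, stated in full; the proofs are below) =====
def Claim_equal_linear_transform_table : Prop := ∀ (b : Int) (table : List (List Int)), Dom_linear_transform_table b table → Pre_linear_transform_table b table → Spec_linear_transform_table b table (linear_transform_table b table)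

-- ===== LEMMAS AND PROOFS =====

theorem pvBit01 (b n : Int) : PySem.Int.band (b >>> (n.toNat : Int)) 1 = 0 ∨ PySem.Int.band (b >>> (n.toNat : Int)) 1 = 1 := by
  rw [PySem.Int.band_one]
  have h1 := PySem.Int.mod_nonneg (b >>> (n.toNat : Int)) (by norm_num : (0:Int) < 2)
  have h2 := PySem.Int.mod_lt (b >>> (n.toNat : Int)) (by norm_num : (0:Int) < 2)
  omega

theorem pvParity_eq_rowBit (b : Int) (row : List Int) : pvParity b row = pvRowBit b row := by
  unfold pvParity pvRowBit
  suffices h : ∀ acc : Int, acc = 0 ∨ acc = 1 →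
      row.foldl (fun bit num => PySem.Int.bxor bit (PySem.Int.band (b >>> num.toNat) 1)) acc =
      PySem.Int.mod (acc + (row.map (fun num => PySem.Int.band (b >>> num.toNat) 1)).sum) 2 by
    simpa using h 0 (Or.inl rfl)
  induction row with
  | nil =>
    intro acc hacc
    simp only [List.foldl_nil, List.map_nil, List.sum_nil, add_zero]
    rcases hacc with h | h <;> rw [h] <;> decide
  | cons n rest ih =>
    intro acc hacc
    simp only [List.foldl_cons, List.map_cons, List.sum_cons]
    have hbit := pvBit01 b n
    have hx : PySem.Int.bxor acc (PySem.Int.band (b >>> (n.toNat : Int)) 1) =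
        PySem.Int.mod (acc + PySem.Int.band (b >>> (n.toNat : Int)) 1) 2 := by
      rcases hacc with h | h <;> rcases hbit with h' | h' <;> rw [h, h'] <;> decide
    have hx01 : PySem.Int.bxor acc (PySem.Int.band (b >>> (n.toNat : Int)) 1) = 0 ∨
        PySem.Int.bxor acc (PySem.Int.band (b >>> (n.toNat : Int)) 1) = 1 := by
      rcases hacc with h | h <;> rcases hbit with h' | h' <;> rw [h, h'] <;> [left; right; right; left] <;> decide
    rw [ih _ hx01, hx]
    simp only [PySem.Int.mod_eq_emod_of_pos (show (0:Int) < 2 by norm_num)]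
    omega

theorem pvRowBit_01 (b : Int) (row : List Int) : pvRowBit b row = 0 ∨ pvRowBit b row = 1 := by
  unfold pvRowBit
  have h1 := PySem.Int.mod_nonneg ((row.map (fun num => PySem.Int.band (b >>> num.toNat) 1)).sum) (by norm_num : (0:Int) < 2)
  have h2 := PySem.Int.mod_lt ((row.map (fun num => PySem.Int.band (b >>> num.toNat) 1)).sum) (by norm_num : (0:Int) < 2)
  omega

theorem pvAlt_nonneg (b : Int) (table : List (List Int)) : 0 ≤ linear_transform_table_alt b table := by
  induction table with
  | nil => simp [linear_transform_table_alt]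
  | cons row rest ih =>
    have := pvRowBit_01 b row
    unfold linear_transform_table_alt
    rcases this with h | h <;> rw [h] <;> omega

theorem pv_lor_two_mul_add (a : Nat) : 2 * a ||| 1 = 2 * a + 1 := by
  have := Nat.lor_bit false a true 0
  simp [Nat.bit] at this
  omega

theorem pv_bor_shift (x bit : Int) (hx : 0 ≤ x) (hb : bit = 0 ∨ bit = 1) :
    PySem.Int.bor (x <<< (1 : Nat)) bit = 2 * x + bit := by
  have hs : x <<< (1 : Nat) = 2 * x := by rw [Int.shiftLeft_eq]; ring
  rcases hb with h | h <;> subst h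
  · rw [PySem.Int.bor_zero, hs]; ring_nf
  · rw [hs, PySem.Int.bor_of_nonneg (by omega) (by norm_num)]
    have h2 : (2 * x).toNat = 2 * x.toNat := by omega
    have h1 : (1 : Int).toNat = 1 := rfl
    rw [h2, h1, pv_lor_two_mul_add]
    omega

theorem pvA_eq_alt (b : Int) (table : List (List Int)) :
    linear_transform_table b table = linear_transform_table_alt b table := by
  unfold linear_transform_table
  induction table with
  | nil => simp [linear_transform_table_alt]
  | cons row rest ih =>
    rw [List.reverse_cons, List.foldl_append]
    simp only [List.foldl_cons, List.foldl_nil]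
    rw [ih, pv_bor_shift _ _ (pvAlt_nonneg b rest)
        (pvParity_eq_rowBit b row ▸ pvRowBit_01 b row), pvParity_eq_rowBit]
    show _ = pvRowBit b row + 2 * linear_transform_table_alt b rest
    ring

-- ===== VERDICT (by name: the statement is the Claim_ definition above) =====
theorem linear_transform_table_spec : Claim_equal_linear_transform_table := by
  intro b table _ _
  unfold Spec_linear_transform_table
  exact pvA_eq_alt b table
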